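-- pv_equiv track=rewrite | github.com/urban6699/life-number-calculator | life_number_calculator.py | calculate_connection_numbers
-- ===== SOURCE A (Python) =====
-- def calculate_connection_numbers(birthdate):
--     """
--     計算生命靈數連線數
--
--     Args:
--         birthdate (str): 出生日期，格式為 'YYYYMMDD'
--
--     Returns:
--         tuple: (先天數, 生命數, 天賦數)
--     """
--     # 先天數：出生日期的日子化簡
--     day = birthdate[6:8]
--     innate = sum(int(d) for d in day)
--     while innate > 9:
--         innate = sum(int(d) for d in str(innate))
--
--     # 生命數：月份化簡
--     month = birthdate[4:6]
--     life = sum(int(d) for d in month)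
--     while life > 9:
--         life = sum(int(d) for d in str(life))
--
--     # 天賦數：先天數+生命數的結果化簡
--     talent = innate + life
--     while talent > 9:
--         talent = sum(int(d) for d in str(talent))
--
--     return (innate, life, talent)
-- ===== SOURCE B (Python) =====
-- def calculate_connection_numbers(birthdate):
--     def digital_root(n):
--         return 0 if n == 0 else (n - 1) % 9 + 1
--     innate = digital_root(sum(int(d) for d in birthdate[6:8]))
--     life = digital_root(sum(int(d) for d in birthdate[4:6]))
--     return (innate, life, digital_root(innate + life))
-- ===== Notes on version B (the rewrite author's own statement) =====
-- stated objective: simpler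
-- what changed: Replaces all three repeated-digit-sum while-loops with the closed-form digital-root formula 0 if n==0 else (n-1)%9+1.
import Mathlib
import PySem

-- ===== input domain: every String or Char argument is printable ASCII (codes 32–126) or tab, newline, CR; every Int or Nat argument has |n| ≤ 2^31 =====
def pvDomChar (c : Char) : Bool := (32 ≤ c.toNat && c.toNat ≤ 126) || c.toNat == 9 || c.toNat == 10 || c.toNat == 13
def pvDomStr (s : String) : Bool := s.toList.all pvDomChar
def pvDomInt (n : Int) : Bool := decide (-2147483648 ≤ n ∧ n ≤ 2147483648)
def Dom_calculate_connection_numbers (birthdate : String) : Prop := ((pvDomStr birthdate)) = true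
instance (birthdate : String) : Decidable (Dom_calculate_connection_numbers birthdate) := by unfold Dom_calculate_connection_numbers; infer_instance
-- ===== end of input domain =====

-- B replaces A's three repeated-digit-sum while-loops with the closed-form digital-root formula (simpler).

-- ===== PORT A =====
-- int(d) for a single character; Pre_ excludes the characters where Python raises ValueError
def pyDigit (c : Char) : Int := (PySem.Int.ofChars? [c]).getD 0

-- sum(int(d) for d in cs)
def pyDigitSum (cs : List Char) : Int := (cs.map pyDigit).sum

-- 'while n > 9: n = sum(int(d) for d in str(n))'; the Nat argument is a totality fuel only
def pyReduce : Nat → Int → Int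
  | 0, n => n
  | f + 1, n => if n > 9 then pyReduce f (pyDigitSum (PySem.Int.toChars n)) else n

def calculate_connection_numbers (birthdate : String) : Int × Int × Int :=
  let day := PySem.List.slice birthdate.toList (some 6) (some 8)
  let innate0 := pyDigitSum day
  let innate := pyReduce (innate0.toNat + 1) innate0
  let month := PySem.List.slice birthdate.toList (some 4) (some 6)
  let life0 := pyDigitSum month
  let life := pyReduce (life0.toNat + 1) life0
  let talent0 := innate + life
  let talent := pyReduce (talent0.toNat + 1) talent0
  (innate, life, talent)

-- ===== PORT B =====
-- 0 if n == 0 else (n - 1) % 9 + 1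
def digitalRoot (n : Int) : Int := if n = 0 then 0 else PySem.Int.mod (n - 1) 9 + 1

def calculate_connection_numbers_alt (birthdate : String) : Int × Int × Int :=
  let innate := digitalRoot (pyDigitSum (PySem.List.slice birthdate.toList (some 6) (some 8)))
  let life := digitalRoot (pyDigitSum (PySem.List.slice birthdate.toList (some 4) (some 6)))
  (innate, life, digitalRoot (innate + life))

-- ===== PRECONDITION & SPEC =====
-- Pre_ excludes exactly the inputs where A raises ValueError: a non-digit character in
-- birthdate[4:8] makes int(d) raise (in A and in B alike).
def Pre_calculate_connection_numbers (birthdate : String) : Prop :=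
  ((birthdate.toList.drop 4).take 4).all PySem.Chars.isdigit = true
instance (birthdate : String) : Decidable (Pre_calculate_connection_numbers birthdate) := by unfold Pre_calculate_connection_numbers; infer_instance

def pvWitness_calculate_connection_numbers : String := "19900101"

def Spec_calculate_connection_numbers (birthdate : String) (out : Int × Int × Int) : Prop := out = calculate_connection_numbers_alt birthdate
instance (birthdate : String) (out : Int × Int × Int) : Decidable (Spec_calculate_connection_numbers birthdate out) := by unfold Spec_calculate_connection_numbers; infer_instance

-- ===== CLAIM (what is proved, stated in full; the proofs are below) =====
def Claim_equal_calculate_connection_numbers : Prop := ∀ (birthdate : String), Dom_calculate_connection_numbers birthdate → Pre_calculate_connection_numbers birthdate → Spec_calculate_connection_numbers birthdate (calculate_connection_numbers birthdate)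

-- ===== LEMMAS AND PROOFS =====

-- a digit character is one of the ten digit literals
lemma digit_char_cases (c : Char) (h : PySem.Chars.isdigit c = true) :
    c = '0' ∨ c = '1' ∨ c = '2' ∨ c = '3' ∨ c = '4' ∨ c = '5' ∨ c = '6' ∨ c = '7' ∨ c = '8' ∨ c = '9' := by
  simp only [PySem.Chars.isdigit, Bool.and_eq_true, decide_eq_true_eq] at h
  obtain ⟨h1, h2⟩ := h
  have hl : 48 ≤ c.toNat := UInt32.le_iff_toNat_le.mp h1
  have hr : c.toNat ≤ 57 := UInt32.le_iff_toNat_le.mp h2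
  have key : ∀ (d : Char), c.toNat = d.toNat → c = d := by
    intro d hd
    exact Char.ext (UInt32.toNat_inj.mp hd)
  have h10 : c.toNat = 48 ∨ c.toNat = 49 ∨ c.toNat = 50 ∨ c.toNat = 51 ∨ c.toNat = 52 ∨ c.toNat = 53 ∨ c.toNat = 54 ∨ c.toNat = 55 ∨ c.toNat = 56 ∨ c.toNat = 57 := by omega
  rcases h10 with h | h | h | h | h | h | h | h | h | h
  · exact Or.inl (key '0' h)
  · exact Or.inr (Or.inl (key '1' h))
  · exact Or.inr (Or.inr (Or.inl (key '2' h)))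
  · exact Or.inr (Or.inr (Or.inr (Or.inl (key '3' h))))
  · exact Or.inr (Or.inr (Or.inr (Or.inr (Or.inl (key '4' h)))))
  · exact Or.inr (Or.inr (Or.inr (Or.inr (Or.inr (Or.inl (key '5' h))))))
  · exact Or.inr (Or.inr (Or.inr (Or.inr (Or.inr (Or.inr (Or.inl (key '6' h)))))))
  · exact Or.inr (Or.inr (Or.inr (Or.inr (Or.inr (Or.inr (Or.inr (Or.inl (key '7' h))))))))
  · exact Or.inr (Or.inr (Or.inr (Or.inr (Or.inr (Or.inr (Or.inr (Or.inr (Or.inl (key '8' h)))))))))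
  · exact Or.inr (Or.inr (Or.inr (Or.inr (Or.inr (Or.inr (Or.inr (Or.inr (Or.inr (key '9' h)))))))))

lemma pyDigit_bounds (c : Char) (h : PySem.Chars.isdigit c = true) :
    0 ≤ pyDigit c ∧ pyDigit c ≤ 9 := by
  rcases digit_char_cases c h with h | h | h | h | h | h | h | h | h | h <;> subst h <;> decide

lemma pyDigitSum_bounds (cs : List Char) (hlen : cs.length ≤ 2)
    (hd : cs.all PySem.Chars.isdigit = true) :
    0 ≤ pyDigitSum cs ∧ pyDigitSum cs ≤ 18 := by
  simp only [List.all_eq_true] at hd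
  rcases cs with _ | ⟨a, _ | ⟨b, _ | ⟨c, t⟩⟩⟩
  · exact ⟨le_refl 0, by norm_num [pyDigitSum]⟩
  · have ha := pyDigit_bounds a (hd a (by simp))
    simp only [pyDigitSum, List.map_cons, List.map_nil, List.sum_cons, List.sum_nil]
    omega
  · have ha := pyDigit_bounds a (hd a (by simp))
    have hb := pyDigit_bounds b (hd b (by simp))
    simp only [pyDigitSum, List.map_cons, List.map_nil, List.sum_cons, List.sum_nil]
    omega
  · simp at hlen

-- on the values the loops ever see under Pre_, the while loop is the closed-form digital root
lemma pyReduce_eq_digitalRoot (n : Int) (_h0 : 0 ≤ n) (h18 : n ≤ 18) :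
    pyReduce (n.toNat + 1) n = digitalRoot n := by
  interval_cases n <;> decide

lemma digitalRoot_bounds (n : Int) (_h0 : 0 ≤ n) :
    0 ≤ digitalRoot n ∧ digitalRoot n ≤ 9 := by
  unfold digitalRoot
  split_ifs with h
  · omega
  · have h1 := PySem.Int.mod_nonneg (n - 1) (b := 9) (by omega)
    have h2 := PySem.Int.mod_lt (n - 1) (b := 9) (by omega)
    omega

-- ===== VERDICT (by name: the statement is the Claim_ definition above) =====
theorem calculate_connection_numbers_spec : Claim_equal_calculate_connection_numbers := by
  intro birthdate _hdom hpre
  unfold Spec_calculate_connection_numbers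
  have hday : PySem.List.slice birthdate.toList (some 6) (some 8) = (birthdate.toList.drop 6).take 2 := by
    have := PySem.List.slice_natCast birthdate.toList 6 8
    norm_num at this ⊢
    exact this
  have hmonth : PySem.List.slice birthdate.toList (some 4) (some 6) = (birthdate.toList.drop 4).take 2 := by
    have := PySem.List.slice_natCast birthdate.toList 4 6
    norm_num at this ⊢
    exact this
  unfold Pre_calculate_connection_numbers at hpre
  simp only [List.all_eq_true] at hpre
  have hdayd : ((birthdate.toList.drop 6).take 2).all PySem.Chars.isdigit = true := by
    simp only [List.all_eq_true]
    intro c hc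
    apply hpre
    have heq : ((birthdate.toList.drop 4).drop 2).take 2 = ((birthdate.toList.drop 4).take 4).drop 2 := by
      rw [List.drop_take]
    rw [show birthdate.toList.drop 6 = (birthdate.toList.drop 4).drop 2 by rw [List.drop_drop]] at hc
    rw [heq] at hc
    exact List.mem_of_mem_drop hc
  have hmonthd : ((birthdate.toList.drop 4).take 2).all PySem.Chars.isdigit = true := by
    simp only [List.all_eq_true]
    intro c hc
    apply hpre
    rw [show (birthdate.toList.drop 4).take 2 = ((birthdate.toList.drop 4).take 4).take 2 by
      rw [List.take_take]; norm_num] at hc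
    exact List.mem_of_mem_take hc
  obtain ⟨hd0, hd18⟩ := pyDigitSum_bounds _ (by simp) hdayd
  obtain ⟨hm0, hm18⟩ := pyDigitSum_bounds _ (by simp) hmonthd
  simp only [calculate_connection_numbers, calculate_connection_numbers_alt]
  rw [hday, hmonth]
  rw [pyReduce_eq_digitalRoot _ hd0 hd18, pyReduce_eq_digitalRoot _ hm0 hm18]
  obtain ⟨hi0, hi9⟩ := digitalRoot_bounds (pyDigitSum ((birthdate.toList.drop 6).take 2)) hd0
  obtain ⟨hl0, hl9⟩ := digitalRoot_bounds (pyDigitSum ((birthdate.toList.drop 4).take 2)) hm0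
  rw [pyReduce_eq_digitalRoot _ (by omega) (by omega)]
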